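-- pv_equiv track=rewrite | github.com/buglenka/python-exercises | ImageOverlap.py | largestOverlap2
-- ===== SOURCE A (Python) =====
-- from typing import List
-- from collections import defaultdict
--
-- def largestOverlap2(A: List[List[int]], B: List[List[int]]) -> int:
--         l = len(A)
--         MULT = 100
--
--         # Difference bitween coordinates is the number of slidings
--         a = [i//l*MULT + i%l for i in range(l*l) if A[i//l][i%l] == 1]
--         b = [i//l*MULT + i%l for i in range(l*l) if B[i//l][i%l] == 1]
--
--         sm = defaultdict(int)
--
--         for i in a:
--             for j in b:
--                 sm[i - j] += 1
--
--         return max(sm.values() or [0])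
-- ===== SOURCE B (Python) =====
-- from typing import List
--
-- def largestOverlap2(A: List[List[int]], B: List[List[int]]) -> int:
--     l = len(A)
--     MULT = 100
--     a = [i//l*MULT + i%l for i in range(l*l) if A[i//l][i%l] == 1]
--     b = [i//l*MULT + i%l for i in range(l*l) if B[i//l][i%l] == 1]
--     # multiplicity table of B's encoded ones, built once
--     cnt = {}
--     for q in b:
--         cnt[q] = cnt.get(q, 0) + 1
--     # enumerate every possible shift (dr, dc) and count matches directly
--     best = 0
--     for dr in range(-(l-1), l):
--         for dc in range(-(l-1), l):
--             d = dr*MULT + dc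
--             c = 0
--             for p in a:
--                 c += cnt.get(p - d, 0)
--             if c > best:
--                 best = c
--     return best
-- ===== Notes on version B (the rewrite author's own statement) =====
-- stated objective: alternative
-- what changed: B replaces A's nested loop over all pairs of ones (building a defaultdict of shift counts and taking max of its values) by a Counter of B's ones built once plus a direct scan over every possible shift (dr, dc), counting matches per shift with O(1) lookups and keeping a running maximum.
import Mathlib
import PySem

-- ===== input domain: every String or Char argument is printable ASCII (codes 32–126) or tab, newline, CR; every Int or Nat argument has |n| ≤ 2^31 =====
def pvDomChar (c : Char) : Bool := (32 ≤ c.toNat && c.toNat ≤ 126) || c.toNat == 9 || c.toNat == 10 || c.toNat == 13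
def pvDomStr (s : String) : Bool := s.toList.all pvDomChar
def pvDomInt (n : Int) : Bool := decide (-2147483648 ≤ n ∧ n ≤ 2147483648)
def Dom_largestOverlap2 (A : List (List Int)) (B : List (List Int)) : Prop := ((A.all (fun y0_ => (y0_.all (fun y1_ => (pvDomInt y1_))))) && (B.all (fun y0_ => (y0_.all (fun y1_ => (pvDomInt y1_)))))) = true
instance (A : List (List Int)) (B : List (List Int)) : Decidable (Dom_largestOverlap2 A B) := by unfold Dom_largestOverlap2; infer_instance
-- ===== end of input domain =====

-- B replaces A's loop over all pairs of ones (a dict of per-shift pair counts, then max of its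
-- values) by a multiplicity table of B's ones built once plus a direct scan over every possible
-- shift with a running maximum; objective: alternative (different algorithm, similar cost).

-- ===== PORT A =====
-- the comprehension '[i//l*MULT + i%l for i in range(l*l) if M[i//l][i%l] == 1]'
-- (this line is identical in A and in B; pyGetD is exact under Pre_largestOverlap2)
def pvOnes (M : List (List Int)) (l : Int) : List Int :=
  (PySem.List.pyRange 0 (l*l) 1).foldl (fun acc i =>
    if PySem.List.pyGetD (PySem.List.pyGetD M (PySem.Int.floordiv i l) []) (PySem.Int.mod i l) 0 = 1
    then acc ++ [PySem.Int.floordiv i l * 100 + PySem.Int.mod i l] else acc) []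

def largestOverlap2 (A : List (List Int)) (B : List (List Int)) : Int :=
  let l : Int := PySem.List.len A
  let a := pvOnes A l
  let b := pvOnes B l
  let sm : PySem.Dict Int Int :=
    a.foldl (fun d i => b.foldl (fun d j => d.modify (i - j) 0 (· + 1)) d) PySem.Dict.empty
  -- 'max(sm.values() or [0])': the argument list is never empty, so max? is always some
  (PySem.List.max? (if sm.values = [] then [0] else sm.values) (fun x => x)).getD 0

-- ===== PORT B =====
def largestOverlap2_alt (A : List (List Int)) (B : List (List Int)) : Int :=
  let l : Int := PySem.List.len A
  let a := pvOnes A l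
  let b := pvOnes B l
  let cnt : PySem.Dict Int Int :=
    b.foldl (fun d q => d.insert q (d.getD q 0 + 1)) PySem.Dict.empty
  (PySem.List.pyRange (-(l-1)) l 1).foldl (fun best dr =>
    (PySem.List.pyRange (-(l-1)) l 1).foldl (fun best dc =>
      let d := dr * 100 + dc
      let c := a.foldl (fun c p => c + cnt.getD (p - d) 0) 0
      if c > best then c else best) best) 0

-- ===== PRECONDITION & SPEC =====
-- Pre_ excludes exactly the inputs on which Python A raises IndexError: a row of A shorter than
-- len(A), fewer than len(A) rows in B, or one of B's first len(A) rows shorter than len(A).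
def Pre_largestOverlap2 (A : List (List Int)) (B : List (List Int)) : Prop :=
  (∀ row ∈ A, A.length ≤ row.length) ∧ A.length ≤ B.length ∧
  (∀ row ∈ B.take A.length, A.length ≤ row.length)
instance (A : List (List Int)) (B : List (List Int)) : Decidable (Pre_largestOverlap2 A B) := by
  unfold Pre_largestOverlap2; infer_instance

def pvWitness_largestOverlap2 : List (List Int) × List (List Int) :=
  ([[1, 0], [0, 1]], [[0, 1], [1, 0]])

def Spec_largestOverlap2 (A : List (List Int)) (B : List (List Int)) (out : Int) : Prop :=
  out = largestOverlap2_alt A B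
instance (A : List (List Int)) (B : List (List Int)) (out : Int) :
    Decidable (Spec_largestOverlap2 A B out) := by unfold Spec_largestOverlap2; infer_instance

-- ===== CLAIM (what is proved, stated in full; the proofs are below) =====
def Claim_equal_largestOverlap2 : Prop := ∀ (A : List (List Int)) (B : List (List Int)), Dom_largestOverlap2 A B → Pre_largestOverlap2 A B → Spec_largestOverlap2 A B (largestOverlap2 A B)

-- ===== LEMMAS AND PROOFS =====

-- the multiset of encoded shift values i - j over all pairs of ones
def pvDl (a b : List Int) : List Int := a.flatMap (fun i => b.map (fun j => i - j))

-- the encoded shift values B enumerates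
def pvGrid (l : Int) : List Int :=
  (PySem.List.pyRange (-(l-1)) l 1).flatMap (fun dr =>
    (PySem.List.pyRange (-(l-1)) l 1).map (fun dc => dr * 100 + dc))

theorem pvOnes_shape (M : List (List Int)) (l : Int) :
    pvOnes M l = ((PySem.List.pyRange 0 (l*l) 1).filter
      (fun i => decide (PySem.List.pyGetD (PySem.List.pyGetD M (PySem.Int.floordiv i l) [])
          (PySem.Int.mod i l) 0 = 1))).map
      (fun i => PySem.Int.floordiv i l * 100 + PySem.Int.mod i l) := by
  unfold pvOnes
  simpa using PySem.List.foldl_append_ite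
    (fun i => PySem.List.pyGetD (PySem.List.pyGetD M (PySem.Int.floordiv i l) [])
        (PySem.Int.mod i l) 0 = 1)
    (fun i => PySem.Int.floordiv i l * 100 + PySem.Int.mod i l)
    (PySem.List.pyRange 0 (l*l) 1) []

theorem pvOnes_mem {M : List (List Int)} {l i : Int} (hl : 0 ≤ l) (h : i ∈ pvOnes M l) :
    ∃ r c : Int, 0 ≤ r ∧ r < l ∧ 0 ≤ c ∧ c < l ∧ i = r * 100 + c := by
  rw [pvOnes_shape] at h
  rcases List.mem_map.1 h with ⟨x, hx, rfl⟩
  have hx2 : 0 ≤ x ∧ x < l * l := PySem.List.mem_pyRange_one.1 (List.mem_filter.1 hx).1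
  have hlpos : 0 < l := by
    by_contra h'
    have hl0 : l = 0 := by omega
    rw [hl0] at hx2; simp at hx2; omega
  refine ⟨PySem.Int.floordiv x l, PySem.Int.mod x l, ?_, ?_, ?_, ?_, rfl⟩
  · exact (PySem.Int.le_floordiv_iff_mul_le hlpos).2 (by simpa using hx2.1)
  · exact (PySem.Int.floordiv_lt_iff_lt_mul hlpos).2 hx2.2
  · exact PySem.Int.mod_nonneg _ hlpos
  · exact PySem.Int.mod_lt _ hlpos

theorem pvMem_grid {A B : List (List Int)} {l k : Int} (hl : 0 ≤ l)
    (hk : k ∈ pvDl (pvOnes A l) (pvOnes B l)) : k ∈ pvGrid l := by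
  rcases List.mem_flatMap.1 hk with ⟨i, hi, hk2⟩
  rcases List.mem_map.1 hk2 with ⟨j, hj, rfl⟩
  obtain ⟨r1, c1, hr10, hr1l, hc10, hc1l, rfl⟩ := pvOnes_mem hl hi
  obtain ⟨r2, c2, hr20, hr2l, hc20, hc2l, rfl⟩ := pvOnes_mem hl hj
  refine List.mem_flatMap.2 ⟨r1 - r2, ?_, List.mem_map.2 ⟨c1 - c2, ?_, by ring⟩⟩
  · exact PySem.List.mem_pyRange_one.2 ⟨by omega, by omega⟩
  · exact PySem.List.mem_pyRange_one.2 ⟨by omega, by omega⟩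

theorem pvCount_map_sub (b : List Int) (p d : Int) :
    (b.map (fun j => p - j)).count d = b.count (p - d) := by
  induction b with
  | nil => simp
  | cons x t ih =>
    simp only [List.map_cons, List.count_cons, ih]
    have hb : ((p - x) == d) = (x == (p - d)) := by
      by_cases h : x = p - d
      · simp [h]
      · have h2 : p - x ≠ d := by omega
        simp [h, h2]
    rw [hb]

theorem pvCount_pvDl (a b : List Int) (d : Int) :
    (pvDl a b).count d = (a.map (fun p => b.count (p - d))).sum := by
  simp [pvDl, List.count_flatMap, Function.comp_def, pvCount_map_sub]

theorem pvSum_map_cast (l : List Int) (f : Int → Nat) :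
    (l.map (fun x => ((f x : Nat) : Int))).sum = ((l.map f).sum : Int) := by
  induction l with
  | nil => simp
  | cons x t ih => simp [ih]

theorem pvMaxfold_eq (xs ys : List Int) (hx : ∀ x ∈ xs, x ∈ ys ∨ x ≤ 0)
    (hy : ∀ y ∈ ys, y ∈ xs ∨ y ≤ 0) : xs.foldl max 0 = ys.foldl max 0 := by
  apply le_antisymm
  · rcases PySem.List.foldl_max_mem xs 0 with h | h
    · rw [h]; exact (PySem.List.le_foldl_max ys 0).1
    · rcases hx _ h with hm | hle
      · exact (PySem.List.le_foldl_max ys 0).2 _ hm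
      · exact le_trans hle (PySem.List.le_foldl_max ys 0).1
  · rcases PySem.List.foldl_max_mem ys 0 with h | h
    · rw [h]; exact (PySem.List.le_foldl_max xs 0).1
    · rcases hy _ h with hm | hle
      · exact (PySem.List.le_foldl_max xs 0).2 _ hm
      · exact le_trans hle (PySem.List.le_foldl_max xs 0).1

theorem pvValues_counter (xs : List Int) :
    (PySem.Dict.counter xs).values = (PySem.Set.ofList xs).map (fun k => ((xs.count k : Nat) : Int)) := by
  simp [PySem.Dict.values, PySem.Dict.items_counter, List.map_map, Function.comp_def]

theorem pvMatch_max_eq (vals : List Int) (hv : ∀ v ∈ vals, 0 ≤ v) :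
    (PySem.List.max? (if vals = [] then [0] else vals) (fun x => x)).getD 0
      = vals.foldl max 0 := by
  cases vals with
  | nil => simp [PySem.List.max?_id_cons]
  | cons v t =>
    have h0 : max 0 v = v := max_eq_right (hv v (by simp))
    simp [PySem.List.max?_id_cons, h0]

theorem pvNested_max_fold (R : List Int) (F : Int → Int) (init : Int) :
    R.foldl (fun best dr => R.foldl (fun best dc => max best (F (dr * 100 + dc))) best) init
      = ((R.flatMap (fun dr => R.map (fun dc => dr * 100 + dc))).map F).foldl max init := by
  simp only [List.foldl_map, List.foldl_flatMap]

theorem largestOverlap2_eq (A B : List (List Int)) :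
    largestOverlap2 A B = largestOverlap2_alt A B := by
  unfold largestOverlap2 largestOverlap2_alt
  dsimp only
  simp only [PySem.List.len_eq]
  have hl : (0 : Int) ≤ (A.length : Int) := Int.natCast_nonneg _
  set l : Int := (A.length : Int) with hldef
  set a := pvOnes A l with hadef
  set b := pvOnes B l with hbdef
  -- A's dict is the counter of the multiset of differences
  have hsm : a.foldl (fun d i => b.foldl (fun d j => d.modify (i - j) 0 (· + 1)) d)
      PySem.Dict.empty = PySem.Dict.counter (pvDl a b) := by
    simp [PySem.Dict.counter_eq_foldl, pvDl, List.foldl_flatMap, List.foldl_map]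
  rw [hsm, pvValues_counter]
  -- B's counter and the per-shift sums
  rw [PySem.Dict.foldl_insert_getD_add_one_eq_counter]
  simp only [PySem.Dict.getD_counter, PySem.List.foldl_add, zero_add]
  have hmax : ∀ (best c : Int), (if c > best then c else best) = max best c := by
    intro best c
    by_cases h : c > best
    · rw [if_pos h, max_eq_right (le_of_lt h)]
    · rw [if_neg h, max_eq_left (by omega)]
  simp only [hmax]
  -- the inner sum is the count of the shift in the difference multiset
  have hF : ∀ d : Int, (a.map (fun p => ((b.count (p - d) : Nat) : Int))).sum
      = (((pvDl a b).count d : Nat) : Int) := by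
    intro d
    rw [pvCount_pvDl, ← pvSum_map_cast]
  simp only [hF]
  rw [pvNested_max_fold (PySem.List.pyRange (-(l-1)) l 1) (fun d => (((pvDl a b).count d : Nat) : Int)) 0, pvMatch_max_eq _ (by
    intro v hv
    rcases List.mem_map.1 hv with ⟨k, _, rfl⟩
    exact Int.natCast_nonneg _)]
  apply pvMaxfold_eq
  · intro x hx
    rcases List.mem_map.1 hx with ⟨k, hk, rfl⟩
    left
    exact List.mem_map.2 ⟨k, pvMem_grid hl ((PySem.Set.mem_ofList _ _).1 hk), rfl⟩
  · intro y hy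
    rcases List.mem_map.1 hy with ⟨d, hd, rfl⟩
    by_cases hmem : d ∈ pvDl a b
    · left
      exact List.mem_map.2 ⟨d, (PySem.Set.mem_ofList _ _).2 hmem, rfl⟩
    · right
      rw [List.count_eq_zero.2 hmem]
      simp

-- ===== VERDICT (by name: the statement is the Claim_ definition above) =====
theorem largestOverlap2_spec : Claim_equal_largestOverlap2 := by
  intro A B _ _
  unfold Spec_largestOverlap2
  exact largestOverlap2_eq A B
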